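-- pv_equiv track=rewrite | github.com/matthematics/schubmult | src/schubmult/_scripts/dominifiable_rule.py | interleave_rc_graphs
-- ===== SOURCE A (Python) =====
-- def interleave_rc_graphs(u_rc, v_rc, pattern='alternating'):
--     """
--     Interleave two RC-graphs row by row.
--
--     Args:
--         u_rc, v_rc: RC graphs to interleave
--         pattern: 'alternating' or 'u_first' (concatenation)
--
--     Returns:
--         List of rows to be reduced via RC-graph product
--     """
--     if pattern == 'alternating':
--         # Alternate rows: u1, v1, u2, v2, ...
--         result_rows = []
--         max_len = max(len(u_rc), len(v_rc))
--
--         for i in range(max_len):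
--             if i < len(u_rc):
--                 result_rows.append(u_rc[i])
--             if i < len(v_rc):
--                 result_rows.append(v_rc[i])
--
--         return result_rows
--
--     elif pattern == 'u_first':
--         # Simple concatenation: all u, then all v
--         return list(u_rc) + list(v_rc)
--
--     else:
--         raise NotImplementedError(f"Pattern {pattern} not implemented")
-- ===== SOURCE B (Python) =====
-- def interleave_rc_graphs(u_rc, v_rc, pattern='alternating'):
--     """
--     Interleave two RC-graphs row by row.
--
--     Two-phase shape: zip the common prefix, then append the remainder slice.
--     """
--     if pattern == 'alternating':
--         result = [row for pair in zip(u_rc, v_rc) for row in pair]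
--         result += u_rc[len(v_rc):] if len(v_rc) < len(u_rc) else v_rc[len(u_rc):]
--         return result
--     elif pattern == 'u_first':
--         return list(u_rc) + list(v_rc)
--     else:
--         raise NotImplementedError(f"Pattern {pattern} not implemented")
-- ===== Notes on version B (the rewrite author's own statement) =====
-- stated objective: idiomatic
-- what changed: Replaces A's single index loop over range(max_len) with two bounds-check-free phases: zip-interleave the common prefix, then append the longer list's tail by one slice.
import Mathlib
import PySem

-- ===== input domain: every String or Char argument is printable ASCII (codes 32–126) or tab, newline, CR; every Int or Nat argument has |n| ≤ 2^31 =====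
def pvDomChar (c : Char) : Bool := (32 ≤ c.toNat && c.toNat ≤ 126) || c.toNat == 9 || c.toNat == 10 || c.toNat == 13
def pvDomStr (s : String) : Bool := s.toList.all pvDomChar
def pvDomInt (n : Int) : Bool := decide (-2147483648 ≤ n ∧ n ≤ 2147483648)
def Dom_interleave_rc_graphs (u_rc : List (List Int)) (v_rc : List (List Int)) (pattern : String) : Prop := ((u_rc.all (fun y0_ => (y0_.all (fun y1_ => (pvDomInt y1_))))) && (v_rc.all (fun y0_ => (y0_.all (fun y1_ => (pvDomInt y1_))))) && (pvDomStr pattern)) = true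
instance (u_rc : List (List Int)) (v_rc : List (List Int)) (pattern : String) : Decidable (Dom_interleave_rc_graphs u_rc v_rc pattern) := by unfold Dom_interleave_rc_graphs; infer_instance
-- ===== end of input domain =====

-- B replaces A's single index loop over range(max_len) with two phases: zip-interleave the common prefix, then append the longer tail by one slice (idiomatic, same cost).


-- ===== PORT A =====
-- literal transliteration of A: index loop i = 0 .. max(len u, len v) - 1, guarded appends
def interleave_rc_graphs (u_rc : List (List Int)) (v_rc : List (List Int)) (pattern : String) : List (List Int) :=
  if pattern = "alternating" then
    let max_len := max u_rc.length v_rc.length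
    (List.range max_len).foldl
      (fun result_rows i =>
        let result_rows := if i < u_rc.length then result_rows ++ [u_rc.getD i []] else result_rows
        if i < v_rc.length then result_rows ++ [v_rc.getD i []] else result_rows)
      []
  else if pattern = "u_first" then
    u_rc ++ v_rc
  else
    []  -- Python raises NotImplementedError here; excluded by Pre_

-- ===== PORT B =====
-- transliteration of B: flatten the zipped common prefix, then append the remainder slice
def interleave_rc_graphs_alt (u_rc : List (List Int)) (v_rc : List (List Int)) (pattern : String) : List (List Int) :=
  if pattern = "alternating" then
    (u_rc.zip v_rc).flatMap (fun p => [p.1, p.2]) ++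
      (if v_rc.length < u_rc.length then u_rc.drop v_rc.length else v_rc.drop u_rc.length)
  else if pattern = "u_first" then
    u_rc ++ v_rc
  else
    []  -- Python raises NotImplementedError here; excluded by Pre_

-- ===== PRECONDITION & SPEC =====
-- Pre_ excludes exactly the patterns on which A raises NotImplementedError.
def Pre_interleave_rc_graphs (u_rc : List (List Int)) (v_rc : List (List Int)) (pattern : String) : Prop :=
  pattern = "alternating" ∨ pattern = "u_first"
instance (u_rc : List (List Int)) (v_rc : List (List Int)) (pattern : String) : Decidable (Pre_interleave_rc_graphs u_rc v_rc pattern) := by unfold Pre_interleave_rc_graphs; infer_instance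
def pvWitness_interleave_rc_graphs : List (List Int) × List (List Int) × String := ([[1]], [[2], [3]], "alternating")
def Spec_interleave_rc_graphs (u_rc : List (List Int)) (v_rc : List (List Int)) (pattern : String) (out : List (List Int)) : Prop := out = interleave_rc_graphs_alt u_rc v_rc pattern
instance (u_rc : List (List Int)) (v_rc : List (List Int)) (pattern : String) (out : List (List Int)) : Decidable (Spec_interleave_rc_graphs u_rc v_rc pattern out) := by unfold Spec_interleave_rc_graphs; infer_instance

-- ===== CLAIM (what is proved, stated in full; the proofs are below) =====
def Claim_equal_interleave_rc_graphs : Prop := ∀ (u_rc : List (List Int)) (v_rc : List (List Int)) (pattern : String), Dom_interleave_rc_graphs u_rc v_rc pattern → Pre_interleave_rc_graphs u_rc v_rc pattern → Spec_interleave_rc_graphs u_rc v_rc pattern (interleave_rc_graphs u_rc v_rc pattern)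

-- ===== LEMMAS AND PROOFS =====

-- the guarded append over all valid indices of w reproduces w
lemma range_fold_getD (w : List (List Int)) (acc : List (List Int)) :
    (List.range w.length).foldl (fun r i => if i < w.length then r ++ [w.getD i []] else r) acc
      = acc ++ w := by
  rw [PySem.List.foldl_congr_mem _ _ (fun r i => r ++ [w.getD i []]) acc
      (by intro a i hi; simp [List.mem_range.mp hi])]
  rw [PySem.List.foldl_append_singleton_eq_map]
  congr 1
  apply List.ext_getElem (by simp)
  intro i h1 h2
  simp [List.getD_eq_getElem?_getD, List.getElem?_eq_getElem h2]

-- A's index loop equals B's zip-then-tail expression, for any accumulator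
lemma loop_eq (u : List (List Int)) : ∀ (v acc : List (List Int)),
    (List.range (max u.length v.length)).foldl
      (fun r i =>
        let r' := if i < u.length then r ++ [u.getD i []] else r
        if i < v.length then r' ++ [v.getD i []] else r')
      acc
      = acc ++ ((u.zip v).flatMap (fun p => [p.1, p.2]) ++
          (if v.length < u.length then u.drop v.length else v.drop u.length)) := by
  induction u with
  | nil =>
    intro v acc
    simpa using range_fold_getD v acc
  | cons x u ih =>
    intro v acc
    cases v with
    | nil =>
      simpa using range_fold_getD (x :: u) acc
    | cons y v =>
      have hmax : max (x :: u).length (y :: v).length = max u.length v.length + 1 := by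
        simp [Nat.succ_max_succ]
      rw [hmax, List.range_succ_eq_map, List.foldl_cons, List.foldl_map]
      simp only [List.length_cons, Nat.zero_lt_succ, if_pos, List.getD_cons_zero,
        Nat.add_lt_add_iff_right, List.getD_cons_succ]
      rw [PySem.List.foldl_congr_mem _ _
          (fun r i =>
            let r' := if i < u.length then r ++ [u.getD i []] else r
            if i < v.length then r' ++ [v.getD i []] else r')
          (acc ++ [x] ++ [y])
          (by intro a i _; simp)]
      rw [ih v (acc ++ [x] ++ [y])]
      simp [List.zip_cons_cons]

-- ===== VERDICT (by name: the statement is the Claim_ definition above) =====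
theorem interleave_rc_graphs_spec : Claim_equal_interleave_rc_graphs := by
  intro u v pattern _ hpre
  unfold Spec_interleave_rc_graphs interleave_rc_graphs interleave_rc_graphs_alt
  rcases hpre with h | h <;> subst h <;> simp
  exact loop_eq u v []
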